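-- pv_equiv track=rewrite | github.com/A-Dying-Pig/2018ADS | inception_v3/query.py | getLSH
-- ===== SOURCE A (Python) =====
-- def getLSH(onevector, k):
--     tempresult = []
--     result = 0
--     for index in range(len(onevector)):
--         #这里还要改进分布的离散程度,哈希方法
--         temp = onevector[index] * 10 + index
--         tempresult.append(temp)
--     for alpha in range(0, 8):
--         test = 0;
--         for index in range(len(onevector)):
--             if(pow(2, alpha) & tempresult[index] == pow(2, alpha)):
--                 delta = 1
--             else:
--                 delta = -1
--             test += k[index] * delta
--         if(test > 0):
--             result += pow(2, alpha)
--     return result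
-- ===== SOURCE B (Python) =====
-- def getLSH(onevector, k):
--     # Bucket the weights by the low byte of the hashed value: the 8 bit-tests
--     # only depend on temp & 255, so one histogram pass over the data replaces
--     # per-element per-bit work; the 8 sign sums then read the 256 buckets.
--     weight = [0] * 256
--     for i in range(len(onevector)):
--         weight[(onevector[i] * 10 + i) & 255] += k[i]
--     result = 0
--     for alpha in range(8):
--         test = 0
--         for b in range(256):
--             if (b >> alpha) & 1:
--                 test += weight[b]
--             else:
--                 test -= weight[b]
--         if test > 0:
--             result += 1 << alpha
--     return result
-- ===== Notes on version B (the rewrite author's own statement) =====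
-- stated objective: faster
-- what changed: Replaces A's eight per-bit scans of the data by a single pass that buckets the weights into a 256-entry histogram keyed by the low byte of the hashed value (the bit tests only depend on temp & 255), then computes each bit's sign sum from the 256 buckets.
import Mathlib
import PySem

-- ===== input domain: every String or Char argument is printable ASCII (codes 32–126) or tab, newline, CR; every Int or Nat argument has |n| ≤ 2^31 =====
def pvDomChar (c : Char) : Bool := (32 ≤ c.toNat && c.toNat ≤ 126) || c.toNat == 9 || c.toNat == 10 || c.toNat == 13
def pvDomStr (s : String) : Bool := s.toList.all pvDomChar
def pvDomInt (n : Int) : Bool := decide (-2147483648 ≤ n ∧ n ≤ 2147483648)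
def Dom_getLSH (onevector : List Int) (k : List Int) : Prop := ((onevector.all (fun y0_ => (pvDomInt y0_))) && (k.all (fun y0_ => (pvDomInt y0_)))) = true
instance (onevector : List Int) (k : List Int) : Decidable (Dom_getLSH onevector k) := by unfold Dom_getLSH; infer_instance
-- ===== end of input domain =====

set_option maxRecDepth 8192

-- B replaces A's eight per-bit scans of the data by one histogram pass bucketed on the
-- low byte of the hashed value (the bit tests depend only on temp & 255), then reads the
-- 256 buckets per bit; measurably faster on large inputs.

-- ===== PORT A =====
-- faithful transliteration of A; indices are in range under Pre_, so getD is exact there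
def getLSH (onevector : List Int) (k : List Int) : Int :=
  let tempresult : List Int :=
    (List.range onevector.length).foldl
      (fun acc index => acc ++ [onevector.getD index 0 * 10 + (index : Int)]) []
  (List.range 8).foldl
    (fun result alpha =>
      let test : Int :=
        (List.range onevector.length).foldl
          (fun test index =>
            let delta : Int :=
              if PySem.Int.band ((2:Int) ^ alpha) (tempresult.getD index 0) = (2:Int) ^ alpha
              then 1 else -1
            test + k.getD index 0 * delta) 0
      if test > 0 then result + (2:Int) ^ alpha else result) 0

-- ===== PORT B =====
-- faithful transliteration of Source B: one bucketing pass (index & is Python's & via PySem.Int.band;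
-- the bucket index is always in range, so set/getD are exact), then 8 scans of the 256 buckets
def getLSH_alt (onevector : List Int) (k : List Int) : Int :=
  let weight : List Int :=
    (List.range onevector.length).foldl
      (fun w i =>
        let b : Nat := (PySem.Int.band (onevector.getD i 0 * 10 + (i : Int)) 255).toNat
        w.set b (w.getD b 0 + k.getD i 0))
      (List.replicate 256 0)
  (List.range 8).foldl
    (fun result alpha =>
      let test : Int :=
        (List.range 256).foldl
          (fun t b =>
            if (b >>> alpha) % 2 = 1 then t + weight.getD b 0 else t - weight.getD b 0) 0
      if test > 0 then result + (1:Int) <<< alpha else result) 0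

-- ===== PRECONDITION & SPEC =====
-- Pre_ excludes exactly the inputs where A raises IndexError (k shorter than onevector); B raises there too.
def Pre_getLSH (onevector : List Int) (k : List Int) : Prop := onevector.length ≤ k.length
instance (onevector : List Int) (k : List Int) : Decidable (Pre_getLSH onevector k) := by unfold Pre_getLSH; infer_instance
def pvWitness_getLSH : List Int × List Int := ([1, -2, 3], [5, -4, 7])

def Spec_getLSH (onevector : List Int) (k : List Int) (out : Int) : Prop := out = getLSH_alt onevector k
instance (onevector : List Int) (k : List Int) (out : Int) : Decidable (Spec_getLSH onevector k out) := by unfold Spec_getLSH; infer_instance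

-- ===== CLAIM (what is proved, stated in full; the proofs are below) =====
def Claim_equal_getLSH : Prop := ∀ (onevector : List Int) (k : List Int), Dom_getLSH onevector k → Pre_getLSH onevector k → Spec_getLSH onevector k (getLSH onevector k)

-- ===== LEMMAS AND PROOFS =====

-- the per-index, per-bit contribution A accumulates
def pvF (onevector k : List Int) (i alpha : Nat) : Int :=
  k.getD i 0 * (if PySem.Int.band ((2:Int) ^ alpha) (onevector.getD i 0 * 10 + (i : Int)) = (2:Int) ^ alpha then 1 else -1)

def pvS (onevector k : List Int) (n alpha : Nat) : Int :=
  ((List.range n).map (fun i => pvF onevector k i alpha)).sum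

-- the sign bucket b contributes to bit alpha, and a hashed value's bucket
def pvSig (alpha b : Nat) : Int := if (b >>> alpha) % 2 = 1 then 1 else -1
def pvKey (t : Int) : Nat := (PySem.Int.band t 255).toNat

-- bit-alpha column sum of a bucket table
def pvCol (alpha : Nat) (w : List Int) : Int :=
  ((List.range 256).map (fun b => pvSig alpha b * w.getD b 0)).sum

-- B's bucketing pass
def pvW (onevector k : List Int) (n : Nat) : List Int :=
  (List.range n).foldl
    (fun w i =>
      let b : Nat := (PySem.Int.band (onevector.getD i 0 * 10 + (i : Int)) 255).toNat
      w.set b (w.getD b 0 + k.getD i 0))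
    (List.replicate 256 0)

theorem pv_foldl_append {g : Nat → Int} (l : List Nat) (acc : List Int) :
    l.foldl (fun a i => a ++ [g i]) acc = acc ++ l.map g := by
  induction l generalizing acc with
  | nil => simp
  | cons x xs ih => simp [List.foldl_cons, ih]

theorem pv_foldl_sum {f : Nat → Int} (l : List Nat) (c : Int) :
    l.foldl (fun t i => t + f i) c = c + (l.map f).sum := by
  induction l generalizing c with
  | nil => simp
  | cons x xs ih => simp [List.foldl_cons, ih]; ring

theorem pv_listsum_finsum (f : Nat → Int) (n : Nat) :
    ((List.range n).map f).sum = ∑ b ∈ Finset.range n, f b := by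
  induction n with
  | zero => simp
  | succ m ih => simp [List.range_succ, Finset.sum_range_succ, ih]

theorem pv_testBit_iff (m alpha : Nat) : (m >>> alpha) % 2 = 1 ↔ m.testBit alpha := by
  rw [Nat.testBit, Nat.shiftRight_eq_div_pow, Nat.and_comm, Nat.and_one_is_mod]
  simp [bne]
theorem pv_byte_flip : ∀ alpha < 8, ∀ v < 256, (255 - v).testBit alpha = !v.testBit alpha := by
  decide
theorem pv_and255_mod (n : Nat) : n &&& 255 = n % 256 := by
  have := Nat.and_two_pow_sub_one_eq_mod n 8
  norm_num at this
  exact this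
theorem pv_bit (alpha : Nat) (h : alpha < 8) (t : Int) :
    (if PySem.Int.band ((2:Int) ^ alpha) t = (2:Int) ^ alpha then (1:Int) else -1)
      = pvSig alpha (pvKey t) := by
  have h2 : (2:Int) ^ alpha = ((2 ^ alpha : Nat) : Int) := by push_cast; ring
  by_cases hpos : (0:Int) ≤ t
  · obtain ⟨n, rfl⟩ := Int.eq_ofNat_of_zero_le hpos
    rw [h2]
    have hb : PySem.Int.band ((2 ^ alpha : Nat) : Int) (n : Int) = ((2 ^ alpha &&& n : Nat) : Int) := by
      simpa using PySem.Int.band_natCast (2 ^ alpha) n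
    have hb' : PySem.Int.band (n : Int) 255 = ((n &&& 255 : Nat) : Int) := by
      simpa using PySem.Int.band_natCast n 255
    have hkey : pvKey (n : Int) = n % 256 := by
      simp only [pvKey, hb', Int.toNat_natCast, pv_and255_mod]
    have hcond : ((2 ^ alpha &&& n : Nat) : Int) = ((2 ^ alpha : Nat) : Int) ↔ n.testBit alpha := by
      rw [Int.natCast_inj, Nat.two_pow_and]
      have hp := Nat.two_pow_pos alpha
      cases hnb : n.testBit alpha <;> simp <;> omega
    have hsig : pvSig alpha (n % 256) = if n.testBit alpha then 1 else -1 := by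
      unfold pvSig
      have hiff : ((n % 256) >>> alpha) % 2 = 1 ↔ n.testBit alpha := by
        rw [pv_testBit_iff]
        have h256 : (256 : Nat) = 2 ^ 8 := by norm_num
        rw [h256, Nat.testBit_mod_two_pow]
        simp [h]
      simp only [hiff]
    rw [hkey, hsig, hb]
    simp only [hcond]
  · set u := (-t - 1).toNat with hu
    have hple : (0:Int) ≤ ((2 ^ alpha : Nat) : Int) := by positivity
    rw [h2]
    have hbandA : PySem.Int.band ((2 ^ alpha : Nat) : Int) t
        = ((2 ^ alpha - (2 ^ alpha &&& u) : Nat) : Int) := by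
      unfold PySem.Int.band
      rw [if_pos hple, if_neg hpos, Int.toNat_natCast, ← hu]
    have hbandB : PySem.Int.band t 255 = ((255 - (255 &&& u) : Nat) : Int) := by
      unfold PySem.Int.band
      rw [if_neg hpos, if_pos (show (0:Int) ≤ 255 by norm_num), ← hu]
      norm_num [Int.toNat]
    have hkey : pvKey t = 255 - u % 256 := by
      simp only [pvKey, hbandB, Int.toNat_natCast, Nat.and_comm 255 u, pv_and255_mod]
    have hcond : ((2 ^ alpha - (2 ^ alpha &&& u) : Nat) : Int) = ((2 ^ alpha : Nat) : Int)
        ↔ ¬ u.testBit alpha := by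
      rw [Int.natCast_inj]
      have hle : 2 ^ alpha &&& u ≤ 2 ^ alpha := Nat.and_le_left
      have hp : 0 < 2 ^ alpha := Nat.two_pow_pos alpha
      rw [Nat.two_pow_and]
      cases hub : u.testBit alpha <;> simp <;> omega
    have hsig : pvSig alpha (255 - u % 256) = if u.testBit alpha then -1 else 1 := by
      unfold pvSig
      have h1 : (255 - u % 256).testBit alpha = !(u % 256).testBit alpha :=
        pv_byte_flip alpha h (u % 256) (Nat.mod_lt _ (by norm_num))
      have h2' : (u % 256).testBit alpha = u.testBit alpha := by
        have h256 : (256 : Nat) = 2 ^ 8 := by norm_num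
        rw [h256, Nat.testBit_mod_two_pow]
        simp [h]
      simp only [pv_testBit_iff, h1, h2']
      cases hub : u.testBit alpha <;> simp
    rw [hbandA, hkey, hsig]
    simp only [hcond]
    cases hub : u.testBit alpha <;> simp

theorem pv_key_lt (t : Int) : pvKey t < 256 := by
  unfold pvKey
  by_cases hpos : (0:Int) ≤ t
  · obtain ⟨n, rfl⟩ := Int.eq_ofNat_of_zero_le hpos
    have hb' : PySem.Int.band (n : Int) 255 = ((n &&& 255 : Nat) : Int) := by
      simpa using PySem.Int.band_natCast n 255
    rw [hb', Int.toNat_natCast]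
    have : n &&& 255 ≤ 255 := Nat.and_le_right
    omega
  · have hbandB : PySem.Int.band t 255 = ((255 - (255 &&& (-t - 1).toNat) : Nat) : Int) := by
      unfold PySem.Int.band
      rw [if_neg hpos, if_pos (show (0:Int) ≤ 255 by norm_num)]
      norm_num [Int.toNat]
    rw [hbandB, Int.toNat_natCast]
    omega

theorem pv_len_pvW (onevector k : List Int) (n : Nat) : (pvW onevector k n).length = 256 := by
  unfold pvW
  induction n with
  | zero => simp
  | succ m ih =>
      rw [List.range_succ, List.foldl_append, List.foldl_cons, List.foldl_nil]
      simpa using ih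

-- updating one bucket shifts the column sum by that bucket's sign times the delta
theorem pv_col_set (w : List Int) (hw : w.length = 256) (j : Nat) (hj : j < 256)
    (d : Int) (alpha : Nat) :
    pvCol alpha (w.set j (w.getD j 0 + d)) = pvCol alpha w + pvSig alpha j * d := by
  unfold pvCol
  rw [pv_listsum_finsum, pv_listsum_finsum]
  have hstep : ∀ b ∈ Finset.range 256,
      pvSig alpha b * (w.set j (w.getD j 0 + d)).getD b 0
        = pvSig alpha b * w.getD b 0 + (if b = j then pvSig alpha j * d else 0) := by
    intro b hb
    have hb' : b < 256 := Finset.mem_range.mp hb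
    by_cases hbj : b = j
    · subst hbj
      have hget : (w.set b (w.getD b 0 + d)).getD b 0 = w.getD b 0 + d := by
        rw [List.getD_eq_getElem?_getD, List.getElem?_set_self (by omega)]
        simp [List.getD_eq_getElem?_getD, List.getElem?_eq_getElem (show b < w.length by omega)]
      rw [hget]; simp; ring
    · have hget : (w.set j (w.getD j 0 + d)).getD b 0 = w.getD b 0 := by
        rw [List.getD_eq_getElem?_getD, List.getElem?_set_ne (by omega), ← List.getD_eq_getElem?_getD]
      rw [hget]; simp [hbj]
  rw [Finset.sum_congr rfl hstep, Finset.sum_add_distrib, Finset.sum_ite_eq' (Finset.range 256)]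
  simp [Finset.mem_range.mpr hj]

-- B's bucketing pass carries exactly A's per-bit sums
theorem pv_W_col (onevector k : List Int) (alpha : Nat) (h : alpha < 8) (n : Nat) :
    pvCol alpha (pvW onevector k n) = pvS onevector k n alpha := by
  induction n with
  | zero =>
      unfold pvW pvCol pvS
      rw [pv_listsum_finsum]
      simp only [List.range_zero, List.map_nil, List.sum_nil, List.foldl_nil]
      apply Finset.sum_eq_zero
      intro b _
      have hrep : (List.replicate 256 (0:Int)).getD b 0 = 0 := by
        rw [List.getD_eq_getElem?_getD, List.getElem?_replicate]
        split <;> simp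
      rw [hrep, mul_zero]
  | succ m ih =>
      have hstep : pvW onevector k (m + 1)
          = (pvW onevector k m).set (pvKey (onevector.getD m 0 * 10 + (m : Int)))
              ((pvW onevector k m).getD (pvKey (onevector.getD m 0 * 10 + (m : Int))) 0 + k.getD m 0) := by
        unfold pvW
        rw [List.range_succ, List.foldl_append, List.foldl_cons, List.foldl_nil]
        rfl
      rw [hstep,
        pv_col_set _ (pv_len_pvW onevector k m) _ (pv_key_lt _) _ alpha, ih]
      have hF : pvF onevector k m alpha
          = pvSig alpha (pvKey (onevector.getD m 0 * 10 + (m : Int))) * k.getD m 0 := by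
        unfold pvF
        rw [pv_bit alpha h]
        ring
      unfold pvS
      rw [List.range_succ]
      simp [hF]

-- B's inner scan of the buckets computes the column sum
theorem pv_B_inner (w : List Int) (alpha : Nat) :
    (List.range 256).foldl
      (fun t b => if (b >>> alpha) % 2 = 1 then t + w.getD b 0 else t - w.getD b 0) 0
    = pvCol alpha w := by
  have hcongr : ∀ (t : Int), ∀ b ∈ List.range 256,
      (if (b >>> alpha) % 2 = 1 then t + w.getD b 0 else t - w.getD b 0)
        = t + pvSig alpha b * w.getD b 0 := by
    intro t b _
    unfold pvSig
    split_ifs <;> ring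
  rw [PySem.List.foldl_congr_mem _ _ (fun t b => t + pvSig alpha b * w.getD b 0) _ hcongr,
    pv_foldl_sum]
  simp [pvCol]

theorem pv_A_inner (onevector k : List Int) (alpha : Nat) :
    (List.range onevector.length).foldl
      (fun test index =>
        test + k.getD index 0 *
          if PySem.Int.band ((2:Int) ^ alpha)
              (((List.range onevector.length).map (fun i => onevector.getD i 0 * 10 + (i : Int))).getD index 0)
              = (2:Int) ^ alpha
          then 1 else -1) 0
    = pvS onevector k onevector.length alpha := by
  rw [PySem.List.foldl_congr_mem _ _ (fun test index => test + pvF onevector k index alpha) _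
      (by
        intro test index hmem
        have hlt : index < onevector.length := List.mem_range.mp hmem
        have hGet : (((List.range onevector.length).map (fun i => onevector.getD i 0 * 10 + (i : Int))).getD index 0)
            = onevector.getD index 0 * 10 + (index : Int) := by simp [List.getD, hlt]
        rw [hGet]
        simp [pvF])]
  rw [pv_foldl_sum]
  simp [pvS]

theorem pv_A_closed (onevector k : List Int) :
    getLSH onevector k
    = (List.range 8).foldl
        (fun result alpha =>
          if pvS onevector k onevector.length alpha > 0 then result + (2:Int) ^ alpha else result) 0 := by
  unfold getLSH
  simp only [pv_foldl_append, List.nil_append]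
  apply PySem.List.foldl_congr_mem
  intro result alpha _
  rw [pv_A_inner]

theorem pv_B_closed (onevector k : List Int) :
    getLSH_alt onevector k
    = (List.range 8).foldl
        (fun result alpha =>
          if (List.range 256).foldl
              (fun t b => if (b >>> alpha) % 2 = 1 then t + (pvW onevector k onevector.length).getD b 0
                          else t - (pvW onevector k onevector.length).getD b 0) 0 > 0
          then result + (1:Int) <<< alpha else result) 0 := rfl

-- ===== VERDICT (by name: the statement is the Claim_ definition above) =====
theorem getLSH_spec : Claim_equal_getLSH := by
  intro onevector k _ _
  unfold Spec_getLSH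
  rw [pv_A_closed, pv_B_closed]
  apply PySem.List.foldl_congr_mem
  intro result alpha hmem
  have halpha : alpha < 8 := List.mem_range.mp hmem
  rw [pv_B_inner, pv_W_col onevector k alpha halpha]
  have h1 : (1:Int) <<< alpha = (2:Int) ^ alpha := by
    rw [Int.shiftLeft_eq]; ring
  rw [h1]
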